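-- pv_equiv track=rewrite | github.com/NeuroGirl/algorithms-and-data-structure | lab1/task2/src/task2.py | insertion_sort_advanced
-- ===== SOURCE A (Python) =====
-- def insertion_sort_advanced(num_len, list_to_sort):
--     motions = [1]
--     for i in range(1, num_len):
--         for j in range(i - 1, -1, -1):
--             if list_to_sort[i] < list_to_sort[j]:
--                 list_to_sort[i], list_to_sort[j] = list_to_sort[j], list_to_sort[i]
--                 i, j = j, i
--         motions.append(i + 1)
--     return motions, list_to_sort
-- ===== SOURCE B (Python) =====
-- import bisect
--
-- def insertion_sort_advanced(num_len, list_to_sort):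
--     # One forward pass with a binary-searched sorted buffer instead of A's
--     # nested swap loops; mutates list_to_sort's prefix in place like A does.
--     motions = [1]
--     if num_len > 1:
--         seen = [list_to_sort[0]]
--         for x in list_to_sort[1:num_len]:
--             motions.append(bisect.bisect_right(seen, x) + 1)
--             bisect.insort_right(seen, x)
--         list_to_sort[:num_len] = seen
--     return motions, list_to_sort
-- ===== Notes on version B (the rewrite author's own statement) =====
-- stated objective: faster
-- what changed: Replaces A's nested swap-down insertion loops by a single forward pass that keeps a sorted buffer, finds each landing position with bisect_right and inserts with insort_right, writing the buffer back over the prefix at the end.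
import Mathlib
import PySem

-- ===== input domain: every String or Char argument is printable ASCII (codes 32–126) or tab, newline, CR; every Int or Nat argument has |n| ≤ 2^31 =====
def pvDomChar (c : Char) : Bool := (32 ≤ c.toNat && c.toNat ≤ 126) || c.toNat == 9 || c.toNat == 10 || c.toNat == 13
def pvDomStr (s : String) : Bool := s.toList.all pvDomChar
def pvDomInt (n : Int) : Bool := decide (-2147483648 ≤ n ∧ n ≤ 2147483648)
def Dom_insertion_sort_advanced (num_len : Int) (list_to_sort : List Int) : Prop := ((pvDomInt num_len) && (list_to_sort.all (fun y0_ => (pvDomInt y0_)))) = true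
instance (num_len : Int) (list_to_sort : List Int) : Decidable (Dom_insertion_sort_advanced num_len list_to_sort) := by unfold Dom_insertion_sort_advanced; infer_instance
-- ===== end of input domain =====

-- B replaces A's nested swap-down insertion loops by one forward pass over the list that keeps a
-- sorted buffer (bisect_right for the landing position, insort_right to insert); equivalence is
-- about the return value (both Pythons also mutate the list's prefix in place the same way).


-- ===== PORT A =====
-- inner body: 'if list[i] < list[j]: swap; i, j = j, i' on state (list, i)
def pvStepA (st : List Int × Int) (j : Int) : List Int × Int :=
  if PySem.List.pyGetD st.1 st.2 0 < PySem.List.pyGetD st.1 j 0 then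
    (PySem.List.pySetD (PySem.List.pySetD st.1 st.2 (PySem.List.pyGetD st.1 j 0)) j
       (PySem.List.pyGetD st.1 st.2 0), j)
  else st

-- 'for j in range(i - 1, -1, -1): …'
def pvInnerA (lst : List Int) (i : Int) : List Int × Int :=
  (PySem.List.pyRange (i - 1) (-1) (-1)).foldl pvStepA (lst, i)

-- one outer iteration on state (motions, list): inner loop, then 'motions.append(i + 1)'
def pvOuterA (st : List Int × List Int) (i : Int) : List Int × List Int :=
  let r := pvInnerA st.2 i
  (st.1 ++ [r.2 + 1], r.1)

def insertion_sort_advanced (num_len : Int) (list_to_sort : List Int) : List Int × List Int :=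
  (PySem.List.pyRange 1 num_len 1).foldl pvOuterA ([1], list_to_sort)

-- ===== PORT B =====
-- hand port of bisect.insort_right, exact on the sorted buffers B applies it to
def pvInsort (x : Int) : List Int → List Int
  | [] => [x]
  | y :: ys => if x < y then x :: y :: ys else y :: pvInsort x ys

-- one iteration of B's forward pass on state (motions, seen)
def pvStepB (st : List Int × List Int) (x : Int) : List Int × List Int :=
  (st.1 ++ [(PySem.List.bisectRight st.2 x : Int) + 1], pvInsort x st.2)

def insertion_sort_advanced_alt (num_len : Int) (list_to_sort : List Int) : List Int × List Int :=
  if 1 < num_len then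
    let st := (PySem.List.slice list_to_sort (some 1) (some num_len)).foldl pvStepB
      ([1], [PySem.List.pyGetD list_to_sort 0 0])
    (st.1, st.2 ++ PySem.List.slice list_to_sort (some num_len) none)
  else ([1], list_to_sort)

-- ===== PRECONDITION & SPEC =====
-- A raises IndexError (list_to_sort[i] with i ≥ len) exactly when 2 ≤ num_len and num_len exceeds
-- the list's length; everything else is admitted.
def Pre_insertion_sort_advanced (num_len : Int) (list_to_sort : List Int) : Prop :=
  num_len ≤ (list_to_sort.length : Int) ∨ num_len ≤ 1
instance (num_len : Int) (list_to_sort : List Int) : Decidable (Pre_insertion_sort_advanced num_len list_to_sort) := by unfold Pre_insertion_sort_advanced; infer_instance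

def pvWitness_insertion_sort_advanced : Int × List Int := (4, [3, 1, 2, 1])

def Spec_insertion_sort_advanced (num_len : Int) (list_to_sort : List Int) (out : List Int × List Int) : Prop := out = insertion_sort_advanced_alt num_len list_to_sort
instance (num_len : Int) (list_to_sort : List Int) (out : List Int × List Int) : Decidable (Spec_insertion_sort_advanced num_len list_to_sort out) := by unfold Spec_insertion_sort_advanced; infer_instance

-- ===== CLAIM (what is proved, stated in full; the proofs are below) =====
def Claim_equal_insertion_sort_advanced : Prop := ∀ (num_len : Int) (list_to_sort : List Int), Dom_insertion_sort_advanced num_len list_to_sort → Pre_insertion_sort_advanced num_len list_to_sort → Spec_insertion_sort_advanced num_len list_to_sort (insertion_sort_advanced num_len list_to_sort)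

-- ===== LEMMAS AND PROOFS =====

-- On a sorted list, bisect_right counts the elements ≤ x.
theorem pv_bisectRight_eq_countP (xs : List Int) (x : Int) (hs : xs.Pairwise (· ≤ ·)) :
    PySem.List.bisectRight xs x = xs.countP (fun y => decide (y ≤ x)) := by
  obtain ⟨hle, hlo, hhi⟩ := PySem.List.bisectRight_spec xs x hs
  set r := PySem.List.bisectRight xs x with hr
  have h1 : (xs.take r).countP (fun y => decide (y ≤ x)) = r := by
    rw [List.countP_eq_length.2]
    · simp [hle]
    · intro y hy
      obtain ⟨j, hj, rfl⟩ := List.mem_take_iff_getElem.1 hy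
      simp only [decide_eq_true_eq]
      exact hlo j (by omega) (by omega)
  have h2 : (xs.drop r).countP (fun y => decide (y ≤ x)) = 0 := by
    rw [List.countP_eq_zero]
    intro y hy
    obtain ⟨j, hj, rfl⟩ := List.getElem_of_mem hy
    rw [List.getElem_drop]
    have := hhi (r + j) (by simp at hj; omega) (by omega)
    simp; omega
  conv_rhs => rw [← List.take_append_drop r xs]
  rw [List.countP_append, h1, h2]; omega

theorem pv_insort_append_of_lt (s : List Int) (x a : Int) (h : x < a) :
    pvInsort x (s ++ [a]) = pvInsort x s ++ [a] := by
  induction s with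
  | nil => simp [pvInsort, h]
  | cons y ys ih => by_cases hy : x < y <;> simp [pvInsort, hy, ih]

theorem pv_insort_of_all_le (s : List Int) (x : Int) (h : ∀ y ∈ s, y ≤ x) :
    pvInsort x s = s ++ [x] := by
  induction s with
  | nil => simp [pvInsort]
  | cons y ys ih =>
    have hy : ¬ x < y := by have := h y (by simp); omega
    simp only [pvInsort, if_neg hy, List.cons_append, List.cons.injEq, true_and]
    exact ih (fun z hz => h z (by simp [hz]))

theorem pv_mem_insort (s : List Int) (x y : Int) : y ∈ pvInsort x s ↔ y = x ∨ y ∈ s := by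
  induction s with
  | nil => simp [pvInsort]
  | cons z zs ih =>
      by_cases hz : x < z
      · simp [pvInsort, hz]
      · simp [pvInsort, hz, ih]
        tauto

theorem pv_insort_sorted (s : List Int) (x : Int) (hs : s.Pairwise (· ≤ ·)) :
    (pvInsort x s).Pairwise (· ≤ ·) := by
  induction s with
  | nil => simp [pvInsort]
  | cons y ys ih =>
    rcases List.pairwise_cons.1 hs with ⟨hy, hys⟩
    by_cases hxy : x < y
    · simp only [pvInsort, if_pos hxy]
      exact List.pairwise_cons.2 ⟨by intro z hz; rcases List.mem_cons.1 hz with rfl | hz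
                                     · omega
                                     · have := hy z hz; omega,
                                  List.pairwise_cons.2 ⟨hy, hys⟩⟩
    · simp only [pvInsort, if_neg hxy]
      refine List.pairwise_cons.2 ⟨?_, ih hys⟩
      intro z hz
      rcases (pv_mem_insort ys x z).1 hz with rfl | hz
      · omega
      · exact hy z hz

theorem pv_length_insort (s : List Int) (x : Int) : (pvInsort x s).length = s.length + 1 := by
  induction s with
  | nil => simp [pvInsort]
  | cons y ys ih => by_cases hy : x < y <;> simp [pvInsort, hy, ih]

-- a run of inner iterations in which the condition never fires leaves the state unchanged
theorem pv_no_swap (L : List Int) (lst : List Int) (p : Int)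
    (h : ∀ j ∈ L, ¬ PySem.List.pyGetD lst p 0 < PySem.List.pyGetD lst j 0) :
    L.foldl pvStepA (lst, p) = (lst, p) := by
  induction L with
  | nil => rfl
  | cons j js ih =>
    simp only [List.foldl_cons]
    rw [show pvStepA (lst, p) j = (lst, p) from by
      simp [pvStepA, h j (by simp)]]
    exact ih (fun k hk => h k (by simp [hk]))

-- A's inner loop inserts the element at position s.length into the sorted prefix s
theorem pv_inner_spec (s : List Int) (x : Int) (rest : List Int) (hs : s.Pairwise (· ≤ ·)) :
    pvInnerA (s ++ x :: rest) (s.length : Int)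
      = (pvInsort x s ++ rest, (PySem.List.bisectRight s x : Int)) := by
  induction s using List.reverseRecOn generalizing rest with
  | nil =>
      simp only [List.nil_append, List.length_nil, Nat.cast_zero, pvInnerA]
      rw [PySem.List.pyRange_neg_one_eq_nil (by omega : (0:Int) - 1 ≤ -1)]
      rw [pv_bisectRight_eq_countP [] x (by simp)]
      simp [pvInsort]
  | append_singleton s' a ih =>
      have hs' : s'.Pairwise (· ≤ ·) := (List.pairwise_append.1 hs).1
      have hsa : ∀ y ∈ s', y ≤ a := fun y hy => (List.pairwise_append.1 hs).2.2 y hy a (by simp)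
      have hlst : (s' ++ [a]) ++ x :: rest = s' ++ a :: x :: rest := by simp
      have hlen : ((s' ++ [a]).length : Int) = (s'.length : Int) + 1 := by simp
      have hgx : PySem.List.pyGetD (s' ++ a :: x :: rest) ((s'.length : Int) + 1) 0 = x := by
        rw [show ((s'.length : Int) + 1) = ((s'.length + 1 : Nat) : Int) by push_cast; ring,
           PySem.List.pyGetD_natCast]
        simp [List.getD]
      have hga : PySem.List.pyGetD (s' ++ a :: x :: rest) ((s'.length : Int)) 0 = a := by
        rw [PySem.List.pyGetD_natCast]
        simp [List.getD]
      rw [pvInnerA, hlst, hlen,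
          show (s'.length : Int) + 1 - 1 = (s'.length : Int) by ring,
          PySem.List.pyRange_neg_one_cons (by omega : (-1:Int) < s'.length),
          List.foldl_cons]
      by_cases hxa : x < a
      · -- swap: state becomes (s' ++ x :: a :: rest, s'.length)
        have hstep : pvStepA (s' ++ a :: x :: rest, (s'.length : Int) + 1) ((s'.length : Int))
            = (s' ++ x :: a :: rest, (s'.length : Int)) := by
          simp only [pvStepA, hgx, hga, if_pos hxa]
          rw [show ((s'.length : Int) + 1) = ((s'.length + 1 : Nat) : Int) by push_cast; ring]
          simp only [PySem.List.pySetD_natCast]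
          simp [List.set]
        rw [hstep]
        have := ih (a :: rest) hs'
        rw [pvInnerA] at this
        rw [this]
        rw [pv_insort_append_of_lt s' x a hxa,
            pv_bisectRight_eq_countP _ x hs, pv_bisectRight_eq_countP _ x hs']
        simp [List.countP_append, show ¬ (a ≤ x) by omega]
      · -- no swap: condition never fires again
        have hstep : pvStepA (s' ++ a :: x :: rest, (s'.length : Int) + 1) ((s'.length : Int))
            = (s' ++ a :: x :: rest, (s'.length : Int) + 1) := by
          simp [pvStepA, hgx, hga, hxa]
        rw [hstep]
        rw [pv_no_swap]
        · rw [pv_insort_of_all_le (s' ++ [a]) x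
              (by intro y hy; rcases List.mem_append.1 hy with h | h
                  · exact le_trans (hsa y h) (by omega)
                  · simp at h; omega),
              pv_bisectRight_eq_countP _ x hs,
              List.countP_eq_length.2 (by
                intro y hy
                rcases List.mem_append.1 hy with h | h
                · simpa using le_trans (hsa y h) (by omega : a ≤ x)
                · simp at h; simp [h]; omega)]
          simp
        · intro j hj
          rw [PySem.List.mem_pyRange_neg_one] at hj
          have h0 : 0 ≤ j := by omega
          have h1 : j < (s'.length : Int) := by omega
          rw [hgx, PySem.List.pyGetD_of_nonneg _ _ h0]
          rw [List.getD_eq_getElem _ _ (by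
                simp only [List.length_append, List.length_cons]; omega)]
          have hmem : (s' ++ a :: x :: rest)[j.toNat]'(by simp; omega) ∈ s' := by
            rw [List.getElem_append_left (by omega : j.toNat < s'.length)]
            exact List.getElem_mem _
          have := hsa _ hmem
          omega

-- A's outer loop over indices [s.length, …) is B's fold over the corresponding elements
theorem pv_outer_spec (ys : List Int) (s tail motions : List Int) (hs : s.Pairwise (· ≤ ·)) :
    ((List.range' s.length ys.length).map (fun (k : Nat) => (k : Int))).foldl pvOuterA
        (motions, s ++ (ys ++ tail))
      = ((ys.foldl pvStepB (motions, s)).1, (ys.foldl pvStepB (motions, s)).2 ++ tail) := by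
  induction ys generalizing s motions with
  | nil => simp
  | cons x ys' ih =>
      rw [List.length_cons, List.range'_succ, List.map_cons, List.foldl_cons, List.foldl_cons]
      have hst : pvOuterA (motions, s ++ (x :: ys' ++ tail)) ((s.length : Int))
          = (motions ++ [(PySem.List.bisectRight s x : Int) + 1], pvInsort x s ++ (ys' ++ tail)) := by
        have : s ++ (x :: ys' ++ tail) = s ++ x :: (ys' ++ tail) := by simp
        rw [pvOuterA, this]
        rw [show pvInnerA (s ++ x :: (ys' ++ tail)) ((s.length : Int))
              = (pvInsort x s ++ (ys' ++ tail), (PySem.List.bisectRight s x : Int))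
            from pv_inner_spec s x (ys' ++ tail) hs]
      rw [hst, pvStepB]
      have hlen : s.length + 1 = (pvInsort x s).length := (pv_length_insort s x).symm
      rw [hlen]
      exact ih (pvInsort x s) _ (pv_insort_sorted s x hs)

-- ===== VERDICT (by name: the statement is the Claim_ definition above) =====
theorem insertion_sort_advanced_spec : Claim_equal_insertion_sort_advanced := by
  intro n l _ hpre
  unfold Spec_insertion_sort_advanced
  by_cases hn : 1 < n
  · have hlen : n ≤ (l.length : Int) := by
      rcases hpre with h | h
      · exact h
      · omega
    cases l with
    | nil => simp at hlen; omega
    | cons a t =>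
      have hnn : n = (n.toNat : Int) := by omega
      set nn := n.toNat with hdef
      have h2 : 2 ≤ nn := by omega
      have hlt : nn - 1 ≤ t.length := by simp at hlen; omega
      have hys : (t.take (nn - 1)).length = nn - 1 := by simp; omega
      -- A side
      have hrange : PySem.List.pyRange 1 n 1
          = (List.range' 1 (nn - 1)).map (fun (k : Nat) => (k : Int)) := by
        rw [PySem.List.pyRange_one, List.range'_eq_map_range, List.map_map]
        have : (n - 1).toNat = nn - 1 := by omega
        rw [this]
        apply List.map_congr_left
        intro k _
        simp
      have hsplit : a :: t = [a] ++ (t.take (nn - 1) ++ t.drop (nn - 1)) := by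
        simp [List.take_append_drop]
      have hA : insertion_sort_advanced n (a :: t)
          = (((t.take (nn - 1)).foldl pvStepB ([1], [a])).1,
             ((t.take (nn - 1)).foldl pvStepB ([1], [a])).2 ++ t.drop (nn - 1)) := by
        rw [insertion_sort_advanced, hrange]
        conv_lhs => rw [hsplit]
        have := pv_outer_spec (t.take (nn - 1)) [a] (t.drop (nn - 1)) [1] (by simp)
        rw [hys] at this
        simpa using this
      -- B side
      have hB : insertion_sort_advanced_alt n (a :: t)
          = (((t.take (nn - 1)).foldl pvStepB ([1], [a])).1,
             ((t.take (nn - 1)).foldl pvStepB ([1], [a])).2 ++ t.drop (nn - 1)) := by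
        rw [insertion_sort_advanced_alt, if_pos hn]
        have hsl : PySem.List.slice (a :: t) (some 1) (some n) = t.take (nn - 1) := by
          rw [PySem.List.slice_toNat _ (by omega) (by omega)]
          simp
          omega
        have hsl2 : PySem.List.slice (a :: t) (some n) none = t.drop (nn - 1) := by
          rw [PySem.List.slice_from _ (by omega),
              show n.toNat = (nn - 1) + 1 by omega, List.drop_succ_cons]
        have hget : PySem.List.pyGetD (a :: t) 0 0 = a := by
          rw [PySem.List.pyGetD_of_nonneg _ _ (by omega)]
          simp
        rw [hsl, hsl2, hget]
      rw [hA, hB]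
  · have hnil : PySem.List.pyRange 1 n 1 = [] := PySem.List.pyRange_one_eq_nil (by omega)
    rw [insertion_sort_advanced, hnil, insertion_sort_advanced_alt, if_neg hn]
    rfl
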